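-- pv_equiv track=rewrite | github.com/Tidone/homeassistant_eta_integration | custom_components/eta_webservices/config_flow.py | _verify_pending_sensors
-- ===== SOURCE A (Python) =====
-- def _verify_pending_sensors(
--
--     new_pending_sensors: dict,
--     new_float_sensors: dict,
--     current_float_sensors: dict,
-- ) -> int:
--     # Pending sensors which are already available as regular sensors can be removed from the pending sensors list
--     deleted_pending_count = 0
--     for key in list(new_pending_sensors.keys()):
--         # Pending sensors will only be promoted to float sensors, so we don't need to check the other sensor categories here
--         if key in current_float_sensors:
--             del new_pending_sensors[key]
--             new_float_sensors[key] = current_float_sensors[key]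
--             deleted_pending_count += 1
--     return deleted_pending_count
-- ===== SOURCE B (Python) =====
-- # B: sort-and-merge instead of hash lookups — sort both key lists, find the
-- # common keys with a two-pointer merge intersection, then apply the moves.
-- # Correct because dict keys are unique, so the merge intersection of the two
-- # sorted key lists is exactly the set of pending keys present in
-- # current_float_sensors, which is what A counts and moves (insertion order of
-- # the mutated dicts may differ from A's; the return value is identical).
-- def _verify_pending_sensors(
--     new_pending_sensors: dict,
--     new_float_sensors: dict,
--     current_float_sensors: dict,
-- ) -> int:
--     pk = sorted(new_pending_sensors)
--     ck = sorted(current_float_sensors)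
--     common = []
--     i = j = 0
--     while i < len(pk) and j < len(ck):
--         if pk[i] < ck[j]:
--             i += 1
--         elif ck[j] < pk[i]:
--             j += 1
--         else:
--             common.append(pk[i])
--             i += 1
--             j += 1
--     for key in common:
--         del new_pending_sensors[key]
--         new_float_sensors[key] = current_float_sensors[key]
--     return len(common)
-- ===== Notes on version B (the rewrite author's own statement) =====
-- stated objective: alternative
-- what changed: Replaces A's single hash-lookup loop over a snapshot of the pending keys by a sort-then-merge algorithm: both key lists are sorted and their intersection is computed with a two-pointer merge, after which the moves are applied and len of the intersection is returned.
import Mathlib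
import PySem

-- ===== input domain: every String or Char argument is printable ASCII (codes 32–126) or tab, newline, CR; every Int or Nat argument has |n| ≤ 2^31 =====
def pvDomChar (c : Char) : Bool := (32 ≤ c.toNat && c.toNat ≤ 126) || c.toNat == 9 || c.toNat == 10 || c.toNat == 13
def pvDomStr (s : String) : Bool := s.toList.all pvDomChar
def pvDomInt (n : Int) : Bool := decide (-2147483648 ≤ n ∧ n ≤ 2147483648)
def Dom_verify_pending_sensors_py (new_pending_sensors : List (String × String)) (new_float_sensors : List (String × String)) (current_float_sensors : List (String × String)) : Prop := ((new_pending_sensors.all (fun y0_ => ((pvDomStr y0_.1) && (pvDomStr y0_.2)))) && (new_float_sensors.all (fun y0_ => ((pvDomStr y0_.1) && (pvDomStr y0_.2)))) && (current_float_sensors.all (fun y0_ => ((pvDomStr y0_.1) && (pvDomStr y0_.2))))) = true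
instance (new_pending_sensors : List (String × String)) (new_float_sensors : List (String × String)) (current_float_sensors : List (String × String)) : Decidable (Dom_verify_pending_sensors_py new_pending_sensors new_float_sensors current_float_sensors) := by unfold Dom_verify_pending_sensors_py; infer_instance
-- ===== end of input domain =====

-- B replaces A's hash-lookup loop by sort-then-two-pointer-merge intersection of the key lists.
-- In Python both versions mutate new_pending_sensors/new_float_sensors; the equivalence proved
-- here is about the RETURN value (the ports return only the Int).

-- ===== PORT A =====
-- for key in list(pending.keys()): if key in current: del pending[key]; float[key]=current[key]; count += 1
def verify_pending_sensors_py (new_pending_sensors : List (String × String)) (new_float_sensors : List (String × String)) (current_float_sensors : List (String × String)) : Int :=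
  let pending := PySem.Dict.ofList new_pending_sensors
  let floats := PySem.Dict.ofList new_float_sensors
  let current := PySem.Dict.ofList current_float_sensors
  let res := pending.keys.foldl
    (fun (st : PySem.Dict String String × PySem.Dict String String × Int) key =>
      if current.contains key then
        (st.1.erase key, st.2.1.insert key ((current.get? key).getD ""), st.2.2 + 1)
      else st)
    (pending, floats, (0 : Int))
  res.2.2

-- ===== PORT B =====
-- the while-loop two-pointer merge of Source B, as structural recursion on the two sorted lists
def pvTwoPtr : List String → List String → List String
  | [], _ => []
  | _ :: _, [] => []
  | x :: xs, y :: ys =>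
    if x < y then pvTwoPtr xs (y :: ys)
    else if y < x then pvTwoPtr (x :: xs) ys
    else x :: pvTwoPtr xs ys
termination_by a b => a.length + b.length

-- pk = sorted(pending); ck = sorted(current); common = two-pointer merge; return len(common)
def verify_pending_sensors_py_alt (new_pending_sensors : List (String × String)) (new_float_sensors : List (String × String)) (current_float_sensors : List (String × String)) : Int :=
  let pending := PySem.Dict.ofList new_pending_sensors
  let current := PySem.Dict.ofList current_float_sensors
  let pk := PySem.List.sorted pending.keys (fun x => x) false
  let ck := PySem.List.sorted current.keys (fun x => x) false
  let common := pvTwoPtr pk ck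
  (common.length : Int)

-- ===== PRECONDITION & SPEC =====
def Spec_verify_pending_sensors_py (new_pending_sensors : List (String × String)) (new_float_sensors : List (String × String)) (current_float_sensors : List (String × String)) (out : Int) : Prop := out = verify_pending_sensors_py_alt new_pending_sensors new_float_sensors current_float_sensors
instance (new_pending_sensors : List (String × String)) (new_float_sensors : List (String × String)) (current_float_sensors : List (String × String)) (out : Int) : Decidable (Spec_verify_pending_sensors_py new_pending_sensors new_float_sensors current_float_sensors out) := by unfold Spec_verify_pending_sensors_py; infer_instance

-- ===== CLAIM (what is proved, stated in full; the proofs are below) =====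
def Claim_equal_verify_pending_sensors_py : Prop := ∀ (new_pending_sensors : List (String × String)) (new_float_sensors : List (String × String)) (current_float_sensors : List (String × String)), Dom_verify_pending_sensors_py new_pending_sensors new_float_sensors current_float_sensors → Spec_verify_pending_sensors_py new_pending_sensors new_float_sensors current_float_sensors (verify_pending_sensors_py new_pending_sensors new_float_sensors current_float_sensors)

-- ===== LEMMAS AND PROOFS =====

-- A's fold only reads `current` in its guard, so its count component is the number of
-- snapshot keys contained in `current`, independently of the mutated dict state.
theorem pv_count_foldl (current : PySem.Dict String String) (keys : List String)
    (st : PySem.Dict String String × PySem.Dict String String × Int) :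
    (keys.foldl
      (fun (st : PySem.Dict String String × PySem.Dict String String × Int) key =>
        if current.contains key then
          (st.1.erase key, st.2.1.insert key ((current.get? key).getD ""), st.2.2 + 1)
        else st) st).2.2
      = st.2.2 + (keys.countP (fun k => current.contains k) : Int) := by
  induction keys generalizing st with
  | nil => simp
  | cons k ks ih =>
      simp only [List.foldl_cons, List.countP_cons]
      by_cases h : current.contains k = true
      · simp [h, ih]; ring
      · simp at h; simp [h, ih]

-- on strictly sorted lists the two-pointer merge computes the filter by membership
theorem pvTwoPtr_eq_filter : ∀ (a b : List String), a.Pairwise (· < ·) → b.Pairwise (· < ·) →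
    pvTwoPtr a b = a.filter (fun x => b.contains x)
  | [], b, _, _ => by simp [pvTwoPtr]
  | x :: xs, [], _, _ => by simp [pvTwoPtr]
  | x :: xs, y :: ys, ha, hb => by
    rw [pvTwoPtr]
    rcases List.pairwise_cons.mp ha with ⟨hax, ha'⟩
    rcases List.pairwise_cons.mp hb with ⟨hby, hb'⟩
    by_cases hxy : x < y
    · have hx : ((y :: ys).contains x) = false := by
        simp only [List.contains_eq_any_beq, List.any_eq_false, beq_iff_eq]
        intro z hz e
        have hxz : x < z := by
          rcases List.mem_cons.mp hz with h | h
          · exact h ▸ hxy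
          · exact hxy.trans (hby z h)
        exact hxz.ne e
      rw [if_pos hxy, List.filter_cons, hx]
      simpa using pvTwoPtr_eq_filter xs (y :: ys) ha' hb
    · have hcongtail : ∀ (hyz : ∀ z ∈ xs, y < z) z, z ∈ xs → (ys.contains z) = ((y :: ys).contains z) := by
        intro hyz z hz
        simp only [List.contains_eq_any_beq, List.any_cons,
          beq_eq_false_iff_ne.mpr (hyz z hz).ne', Bool.false_or]
      by_cases hyx : y < x
      · rw [if_neg hxy, if_pos hyx,
          pvTwoPtr_eq_filter (x :: xs) ys ha hb']
        refine List.filter_congr ?_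
        intro z hz
        have hyz : y < z := by
          rcases List.mem_cons.mp hz with h | h
          · exact h ▸ hyx
          · exact hyx.trans (hax z h)
        simp only [List.contains_eq_any_beq, List.any_cons,
          beq_eq_false_iff_ne.mpr hyz.ne', Bool.false_or]
      · have hxeq : x = y := le_antisymm (not_lt.mp hyx) (not_lt.mp hxy)
        have hx : ((y :: ys).contains x) = true := by simp [hxeq]
        rw [if_neg hxy, if_neg hyx, List.filter_cons, hx]
        simp only [if_true]
        rw [pvTwoPtr_eq_filter xs ys ha' hb',
          List.filter_congr (hcongtail (fun z hz => hxeq ▸ hax z hz))]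
termination_by a b => a.length + b.length

-- sorted(keys of a dict) is strictly increasing (keys are Nodup)
theorem pv_sorted_keys_strict (d : PySem.Dict String String) (hnd : d.keys.Nodup) :
    (PySem.List.sorted d.keys (fun x => x) false).Pairwise (· < ·) := by
  have hperm := PySem.List.sorted_perm d.keys (fun x => x) false
  have hle : (PySem.List.sorted d.keys (fun x => x) false).Pairwise (· ≤ ·) :=
    PySem.List.sorted_pairwise d.keys (fun x => x)
  have hnd' : (PySem.List.sorted d.keys (fun x => x) false).Nodup := hperm.nodup_iff.mpr hnd
  exact (hle.and hnd').imp (fun h => lt_of_le_of_ne h.1 h.2)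

-- ===== VERDICT (by name: the statement is the Claim_ definition above) =====
theorem verify_pending_sensors_py_spec : Claim_equal_verify_pending_sensors_py := by
  intro nps nfs cfs _
  unfold Spec_verify_pending_sensors_py verify_pending_sensors_py verify_pending_sensors_py_alt
  simp only
  rw [pv_count_foldl]
  rw [pvTwoPtr_eq_filter _ _
    (pv_sorted_keys_strict _ (PySem.Dict.nodup_keys_ofList nps))
    (pv_sorted_keys_strict _ (PySem.Dict.nodup_keys_ofList cfs))]
  rw [← List.countP_eq_length_filter,
    (PySem.List.sorted_perm (PySem.Dict.ofList nps).keys (fun x => x) false).countP_eq]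
  have hpred : ∀ x : String,
      ((PySem.Dict.ofList cfs).contains x)
        = ((PySem.List.sorted (PySem.Dict.ofList cfs).keys (fun x => x) false).contains x) := by
    intro x
    rw [Bool.eq_iff_iff]
    constructor <;> intro h
    · exact List.contains_iff_mem.mpr ((PySem.List.mem_sorted _ _ _ _).mpr
        ((PySem.Dict.contains_iff_mem_keys _ _).mp h))
    · exact (PySem.Dict.contains_iff_mem_keys _ _).mpr
        ((PySem.List.mem_sorted _ _ _ _).mp (List.contains_iff_mem.mp h))
  rw [List.countP_congr (fun a _ => by rw [hpred a])]
  simp only [zero_add]
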